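-- pv_equiv track=rewrite | github.com/ChrisCj8/ap_adventure | apworld/ImpliedCapabilities.py | ProcessCapabs
-- ===== SOURCE A (Python) =====
-- impliedcapabilities = {
--     "WeakMelee": ["WimpyMelee"],
--     "MidMelee": ["DecentMelee"],
--     "DecentMelee": ["MidMelee","WeakMelee"],
--     "StrongMelee": ["DecentMelee"],
--     "WeakShortRange": ["WimpyShortRange"],
--     "DecentShortRange": ["WeakShortRange"],
--     "StrongShortRange": ["DecentShortRange"],
--     "WeakMidRange": ["WimpyMidRange"],
--     "DecentMidRange": ["WeakMidRange"],
--     "StrongMidRange": ["DecentMidRange"],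
--     "WeakLongRange": ["WimpyLongRange"],
--     "DecentLongRange": ["WeakLongRange"],
--     "StrongLongRange": ["DecentLongRange"],
--     "ShortArcProjectile": ["TinyArcProjectile"],
--     "MediumArcProjectile":["ShortArcProjectile"],
--     "LongArcProjectile":["MediumArcProjectile"],
--     "TinyExplosion": ["SmallOrSmallerExplosion","TinyOrLargerExplosion"],
--     "SmallExplosion": ["SmallOrSmallerExplosion","SmallOrLargerExplosion"],
--     "MediumSizeExplosion": ["MediumSizeOrSmallerExplosion","MediumSizeOrLargerExplosion","MediumOrSmallerExplosion","MediumOrLargerExplosion"],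
--     "LargeExplosion": ["LargeOrSmallerExplosion","MediumSizeOrLargerExplosion"],
--     "MediumSizeOrSmallerExplosion": ["SmallOrSmallerExplosion"],
--     "LargeOrSmallerExplosion": ["MediumOrSmallerExplosion"],
--     "TinyOrLargerExplosion": ["SmallOrLargerExplosion"],
--     "SmallOrLargerExplosion": ["MediumSizeOrLargerExplosion"],
-- }
--
-- def ProcessCapabs(capabin):
--     newcapabs = capabin.copy()
--     newamt = 0
--
--     for capab in capabin:
--         if capab in impliedcapabilities:
--             implied = impliedcapabilities[capab]
--             for newcap in implied:
--                 if not newcap in newcapabs: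
--                     newcapabs.add(newcap)
--                     newamt += 1
--
--     if newamt > 0:
--         return ProcessCapabs(newcapabs)
--     else:
--         return newcapabs
-- ===== SOURCE B (Python) =====
-- impliedcapabilities = {
--     "WeakMelee": ["WimpyMelee"],
--     "MidMelee": ["DecentMelee"],
--     "DecentMelee": ["MidMelee","WeakMelee"],
--     "StrongMelee": ["DecentMelee"],
--     "WeakShortRange": ["WimpyShortRange"],
--     "DecentShortRange": ["WeakShortRange"],
--     "StrongShortRange": ["DecentShortRange"],
--     "WeakMidRange": ["WimpyMidRange"],
--     "DecentMidRange": ["WeakMidRange"],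
--     "StrongMidRange": ["DecentMidRange"],
--     "WeakLongRange": ["WimpyLongRange"],
--     "DecentLongRange": ["WeakLongRange"],
--     "StrongLongRange": ["DecentLongRange"],
--     "ShortArcProjectile": ["TinyArcProjectile"],
--     "MediumArcProjectile":["ShortArcProjectile"],
--     "LongArcProjectile":["MediumArcProjectile"],
--     "TinyExplosion": ["SmallOrSmallerExplosion","TinyOrLargerExplosion"],
--     "SmallExplosion": ["SmallOrSmallerExplosion","SmallOrLargerExplosion"],
--     "MediumSizeExplosion": ["MediumSizeOrSmallerExplosion","MediumSizeOrLargerExplosion","MediumOrSmallerExplosion","MediumOrLargerExplosion"],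
--     "LargeExplosion": ["LargeOrSmallerExplosion","MediumSizeOrLargerExplosion"],
--     "MediumSizeOrSmallerExplosion": ["SmallOrSmallerExplosion"],
--     "LargeOrSmallerExplosion": ["MediumOrSmallerExplosion"],
--     "TinyOrLargerExplosion": ["SmallOrLargerExplosion"],
--     "SmallOrLargerExplosion": ["MediumSizeOrLargerExplosion"],
-- }
--
-- def ProcessCapabs(capabin):
--     result = capabin.copy()
--     worklist = list(capabin)
--     i = 0
--     while i < len(worklist):
--         capab = worklist[i]
--         for newcap in impliedcapabilities.get(capab, []):
--             if newcap not in result: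
--                 result.add(newcap)
--                 worklist.append(newcap)
--         i += 1
--     return result
-- ===== Notes on version B (the rewrite author's own statement) =====
-- stated objective: alternative
-- what changed: A recomputes the closure by repeatedly rescanning the entire growing set and recursing until a full pass adds nothing; B makes a single pass with a FIFO worklist, processing each capability exactly once and pushing newly implied capabilities as they are discovered.
import Mathlib
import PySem

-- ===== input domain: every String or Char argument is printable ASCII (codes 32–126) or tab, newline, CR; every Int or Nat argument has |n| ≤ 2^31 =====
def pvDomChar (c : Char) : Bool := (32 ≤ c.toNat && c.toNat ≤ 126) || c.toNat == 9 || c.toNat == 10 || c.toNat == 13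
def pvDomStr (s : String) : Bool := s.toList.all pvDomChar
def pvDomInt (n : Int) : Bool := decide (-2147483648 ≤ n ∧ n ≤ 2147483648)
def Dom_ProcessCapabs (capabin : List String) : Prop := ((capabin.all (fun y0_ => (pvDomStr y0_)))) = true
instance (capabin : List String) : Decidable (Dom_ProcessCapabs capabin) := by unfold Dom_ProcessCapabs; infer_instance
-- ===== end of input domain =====

-- B replaces A's whole-set rescanning fixpoint recursion by a one-pass FIFO worklist that
-- processes each discovered capability once; same returned set (proved as the same list).

def impliedcapabilities : PySem.Dict String (List String) := PySem.Dict.ofList [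
  ("WeakMelee", ["WimpyMelee"]),
  ("MidMelee", ["DecentMelee"]),
  ("DecentMelee", ["MidMelee","WeakMelee"]),
  ("StrongMelee", ["DecentMelee"]),
  ("WeakShortRange", ["WimpyShortRange"]),
  ("DecentShortRange", ["WeakShortRange"]),
  ("StrongShortRange", ["DecentShortRange"]),
  ("WeakMidRange", ["WimpyMidRange"]),
  ("DecentMidRange", ["WeakMidRange"]),
  ("StrongMidRange", ["DecentMidRange"]),
  ("WeakLongRange", ["WimpyLongRange"]),
  ("DecentLongRange", ["WeakLongRange"]),
  ("StrongLongRange", ["DecentLongRange"]),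
  ("ShortArcProjectile", ["TinyArcProjectile"]),
  ("MediumArcProjectile", ["ShortArcProjectile"]),
  ("LongArcProjectile", ["MediumArcProjectile"]),
  ("TinyExplosion", ["SmallOrSmallerExplosion","TinyOrLargerExplosion"]),
  ("SmallExplosion", ["SmallOrSmallerExplosion","SmallOrLargerExplosion"]),
  ("MediumSizeExplosion", ["MediumSizeOrSmallerExplosion","MediumSizeOrLargerExplosion","MediumOrSmallerExplosion","MediumOrLargerExplosion"]),
  ("LargeExplosion", ["LargeOrSmallerExplosion","MediumSizeOrLargerExplosion"]),
  ("MediumSizeOrSmallerExplosion", ["SmallOrSmallerExplosion"]),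
  ("LargeOrSmallerExplosion", ["MediumOrSmallerExplosion"]),
  ("TinyOrLargerExplosion", ["SmallOrLargerExplosion"]),
  ("SmallOrLargerExplosion", ["MediumSizeOrLargerExplosion"])]

-- finite universe of all values ever added (used only to size the structural fuel of the ports)
def impAllF : Finset String := (impliedcapabilities.values).flatten.toFinset

-- ===== PORT A =====
-- inner loop 'for newcap in implied: if not newcap in newcapabs: add; newamt += 1'
def pvStepAInner (s : List String × Nat) (newcap : String) : List String × Nat :=
  if newcap ∈ s.1 then s else (s.1 ++ [newcap], s.2 + 1)

-- body of 'for capab in capabin: if capab in impliedcapabilities: …'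
def pvStepA (s : List String × Nat) (capab : String) : List String × Nat :=
  match PySem.Dict.get? impliedcapabilities capab with
  | some implied => implied.foldl pvStepAInner s
  | none => s

-- A's recursion; the fuel only bounds the recursion depth (proved sufficient below)
def pvAAux : Nat → List String → List String
  | 0, cap => cap
  | f+1, cap =>
    let s := cap.foldl pvStepA (cap, 0)
    if s.2 > 0 then pvAAux f s.1 else s.1

def ProcessCapabs (capabin : List String) : List String :=
  pvAAux (impAllF.card + 1) capabin

-- ===== PORT B =====
-- inner loop 'for newcap in ….get(capab, []): if newcap not in result: result.add; worklist.append'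
def pvStepB (s : List String × List String) (newcap : String) : List String × List String :=
  if newcap ∈ s.1 then s else (s.1 ++ [newcap], s.2 ++ [newcap])

-- 'while i < len(worklist): capab = worklist[i]; …; i += 1'; the fuel only bounds the number of
-- loop iterations (proved sufficient below); 'worklist[i]' is ported as 'wl.getD i ""', exact since 0 ≤ i < len(wl)
def pvBLoop : Nat → List String → List String → Nat → List String
  | 0, res, _, _ => res
  | f+1, res, wl, i =>
    if i < wl.length then
      let s := (PySem.Dict.getD impliedcapabilities (wl.getD i "") []).foldl pvStepB (res, wl)
      pvBLoop f s.1 s.2 (i+1)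
    else res

def ProcessCapabs_alt (capabin : List String) : List String :=
  pvBLoop (capabin.length + impAllF.card) capabin capabin 0

-- ===== PRECONDITION & SPEC =====
def Spec_ProcessCapabs (capabin : List String) (out : List String) : Prop := out = ProcessCapabs_alt capabin
instance (capabin : List String) (out : List String) : Decidable (Spec_ProcessCapabs capabin out) := by unfold Spec_ProcessCapabs; infer_instance

-- ===== CLAIM (what is proved, stated in full; the proofs are below) =====
def Claim_equal_ProcessCapabs : Prop := ∀ (capabin : List String), Dom_ProcessCapabs capabin → Spec_ProcessCapabs capabin (ProcessCapabs capabin)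

-- ===== LEMMAS AND PROOFS =====

-- proof-side view of B's loop: the still-unprocessed suffix of the worklist as an explicit queue
def pvBAux : Nat → List String → List String → List String
  | _, res, [] => res
  | 0, res, _ :: _ => res
  | f+1, res, x :: qs =>
    let s := (PySem.Dict.getD impliedcapabilities x []).foldl pvStepB (res, qs)
    pvBAux f s.1 s.2

-- the implied list of one capability
def pvImp (x : String) : List String := PySem.Dict.getD impliedcapabilities x []

-- the fresh elements appended when scanning ys against current set res, in order
def pvNews (res : List String) : List String → List String
  | [] => []
  | y :: ys => if y ∈ res then pvNews res ys else y :: pvNews (res ++ [y]) ys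

-- the fresh elements appended by one A-pass / one B-queue-segment over p
def pvPass (res : List String) : List String → List String
  | [] => []
  | x :: p => pvNews res (pvImp x) ++ pvPass (res ++ pvNews res (pvImp x)) p

-- queue measure: pops remaining = queue + universe elements not yet in res
def pvMu (res q : List String) : Nat := q.length + (impAllF \ res.toFinset).card

theorem pvStepA_eq (s : List String × Nat) (x : String) :
    pvStepA s x = (pvImp x).foldl pvStepAInner s := by
  unfold pvStepA pvImp
  rw [PySem.Dict.getD_eq_get?_getD]
  cases PySem.Dict.get? impliedcapabilities x <;> simp

theorem pvFoldAInner (ys : List String) : ∀ res amt,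
    ys.foldl pvStepAInner (res, amt) = (res ++ pvNews res ys, amt + (pvNews res ys).length) := by
  induction ys with
  | nil => intro res amt; simp [pvNews]
  | cons y ys ih =>
    intro res amt
    simp only [List.foldl, pvStepAInner, pvNews]
    by_cases h : y ∈ res
    · simp [h, ih]
    · simp only [h, if_false, ih]
      simp [List.append_assoc]
      omega

theorem pvFoldB (ys : List String) : ∀ res qs,
    ys.foldl pvStepB (res, qs) = (res ++ pvNews res ys, qs ++ pvNews res ys) := by
  induction ys with
  | nil => intro res qs; simp [pvNews]
  | cons y ys ih =>
    intro res qs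
    simp only [List.foldl, pvStepB, pvNews]
    by_cases h : y ∈ res
    · simp [h, ih]
    · simp only [h, if_false, ih]
      simp [List.append_assoc]

theorem pvMem_news {z : String} (ys : List String) : ∀ res, z ∈ pvNews res ys → z ∈ ys ∧ z ∉ res := by
  induction ys with
  | nil => intro res h; simp [pvNews] at h
  | cons y ys ih =>
    intro res h
    simp only [pvNews] at h
    by_cases hy : y ∈ res
    · rcases ih res (by simpa [hy] using h) with ⟨h1, h2⟩
      exact ⟨List.mem_cons_of_mem _ h1, h2⟩
    · simp only [hy, if_false, List.mem_cons] at h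
      rcases h with rfl | h
      · exact ⟨List.mem_cons_self, hy⟩
      · rcases ih _ h with ⟨h1, h2⟩
        refine ⟨List.mem_cons_of_mem _ h1, fun hz => h2 ?_⟩
        exact List.mem_append.2 (Or.inl hz)

theorem pvNews_complete {z : String} (ys : List String) : ∀ res, z ∈ ys → z ∈ res ++ pvNews res ys := by
  induction ys with
  | nil => intro res h; simp at h
  | cons y ys ih =>
    intro res h
    simp only [pvNews]
    by_cases hy : y ∈ res
    · rcases List.mem_cons.1 h with rfl | h
      · simp [hy]
      · simpa [hy] using ih res h
    · rcases List.mem_cons.1 h with rfl | h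
      · simp [hy]
      · have := ih (res ++ [y]) h
        simp only [hy, if_false]
        rcases List.mem_append.1 this with h1 | h1
        · rcases List.mem_append.1 h1 with h2 | h2
          · exact List.mem_append.2 (Or.inl h2)
          · simp at h2; subst h2; simp
        · simp [h1]

theorem pvNews_nil_of_sub (ys : List String) : ∀ res, (∀ z ∈ ys, z ∈ res) → pvNews res ys = [] := by
  induction ys with
  | nil => intro res _; simp [pvNews]
  | cons y ys ih =>
    intro res h
    have hy : y ∈ res := h y (List.mem_cons_self)
    simp only [pvNews, hy, if_true]
    exact ih res (fun z hz => h z (List.mem_cons_of_mem _ hz))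

theorem pvNews_nodup (ys : List String) : ∀ res, (pvNews res ys).Nodup := by
  induction ys with
  | nil => intro res; simp [pvNews]
  | cons y ys ih =>
    intro res
    simp only [pvNews]
    by_cases hy : y ∈ res
    · simp [hy, ih]
    · rw [if_neg hy]
      refine List.nodup_cons.2 ⟨fun hmem => ?_, ih _⟩
      rcases pvMem_news ys _ hmem with ⟨_, h2⟩
      exact h2 (by simp)

theorem pvFoldPass (p : List String) : ∀ res amt,
    p.foldl pvStepA (res, amt) = (res ++ pvPass res p, amt + (pvPass res p).length) := by
  induction p with
  | nil => intro res amt; simp [pvPass]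
  | cons x p ih =>
    intro res amt
    simp only [List.foldl, pvStepA_eq, pvFoldAInner, pvPass, ih]
    simp [List.append_assoc]
    omega

theorem pvGet?_mem_values {κ ν : Type} [BEq κ] (d : PySem.Dict κ ν) (k : κ) (v : ν)
    (h : PySem.Dict.get? d k = some v) : v ∈ PySem.Dict.values d := by
  obtain ⟨l⟩ := d
  induction l with
  | nil => simp [PySem.Dict.get?] at h
  | cons p rest ih =>
    rw [PySem.Dict.get?_mk_cons] at h
    by_cases hk : p.1 == k
    · simp only [hk, if_true, Option.some.injEq] at h
      subst h
      simp [PySem.Dict.values]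
    · simp only [hk, Bool.false_eq_true, if_false] at h
      have := ih h
      simp [PySem.Dict.values] at this ⊢
      exact Or.inr this

theorem pvImp_sub {z x : String} (h : z ∈ pvImp x) : z ∈ impAllF := by
  unfold pvImp at h
  rw [PySem.Dict.getD_eq_get?_getD] at h
  cases hg : PySem.Dict.get? impliedcapabilities x with
  | none => rw [hg] at h; simp at h
  | some ys =>
    rw [hg] at h
    simp only [Option.getD_some] at h
    have hv := pvGet?_mem_values _ _ _ hg
    unfold impAllF
    rw [List.mem_toFinset]
    exact List.mem_flatten.2 ⟨ys, hv, h⟩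

theorem pvMem_pass {z : String} (p : List String) : ∀ res, z ∈ pvPass res p → z ∈ impAllF ∧ z ∉ res := by
  induction p with
  | nil => intro res h; simp [pvPass] at h
  | cons x p ih =>
    intro res h
    simp only [pvPass] at h
    rcases List.mem_append.1 h with h1 | h1
    · rcases pvMem_news _ _ h1 with ⟨h2, h3⟩
      exact ⟨pvImp_sub h2, h3⟩
    · rcases ih _ h1 with ⟨h2, h3⟩
      exact ⟨h2, fun hz => h3 (List.mem_append.2 (Or.inl hz))⟩

-- one B step decreases pvMu by exactly one
theorem pvMu_step (res : List String) (x : String) (qs : List String) :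
    pvMu (res ++ pvNews res (pvImp x)) (qs ++ pvNews res (pvImp x)) + 1 = pvMu res (x :: qs) := by
  set ns := pvNews res (pvImp x) with hns
  have hsub : ns.toFinset ⊆ impAllF \ res.toFinset := by
    intro z hz
    rw [List.mem_toFinset] at hz
    rcases pvMem_news _ _ hz with ⟨h1, h2⟩
    exact Finset.mem_sdiff.2 ⟨pvImp_sub h1, by simpa [List.mem_toFinset] using h2⟩
  have hcard : ns.toFinset.card = ns.length := List.toFinset_card_of_nodup (pvNews_nodup _ _)
  have hset : (res ++ ns).toFinset = res.toFinset ∪ ns.toFinset := by simp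
  have hX : (impAllF \ (res ++ ns).toFinset) = (impAllF \ res.toFinset) \ ns.toFinset := by
    rw [hset]
    exact (sdiff_sdiff _ _ _).symm
  rw [pvMu, pvMu, hX, Finset.card_sdiff, Finset.inter_eq_left.mpr hsub]
  simp only [List.length_append, List.length_cons]
  have := Finset.card_le_card hsub
  omega

theorem pvBAux_nil (f : Nat) (res : List String) : pvBAux f res [] = res := by
  cases f <;> rfl

-- fuel irrelevance above the measure
theorem pvBAux_fuel : ∀ n f g res q, pvMu res q ≤ n → pvMu res q ≤ f → pvMu res q ≤ g →
    pvBAux f res q = pvBAux g res q := by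
  intro n
  induction n with
  | zero =>
    intro f g res q hn _ _
    cases q with
    | nil => rw [pvBAux_nil, pvBAux_nil]
    | cons x qs => simp [pvMu] at hn
  | succ n ih =>
    intro f g res q hn hf hg
    cases q with
    | nil => rw [pvBAux_nil, pvBAux_nil]
    | cons x qs =>
      have hmu1 : 1 ≤ pvMu res (x :: qs) := by simp [pvMu]; omega
      obtain ⟨f', rfl⟩ : ∃ f', f = f' + 1 := ⟨f - 1, by omega⟩
      obtain ⟨g', rfl⟩ : ∃ g', g = g' + 1 := ⟨g - 1, by omega⟩
      show pvBAux f' _ _ = pvBAux g' _ _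
      rw [show PySem.Dict.getD impliedcapabilities x [] = pvImp x from rfl, pvFoldB]
      have hdec := pvMu_step res x qs
      exact ih f' g' (res ++ pvNews res (pvImp x)) (qs ++ pvNews res (pvImp x)) (by omega) (by omega) (by omega)

-- canonical run: pvBAux with exactly enough fuel
def pvC (res q : List String) : List String := pvBAux (pvMu res q) res q

theorem pvC_eq (f : Nat) (res q : List String) (h : pvMu res q ≤ f) : pvBAux f res q = pvC res q :=
  pvBAux_fuel f f (pvMu res q) res q h h le_rfl

theorem pvC_step (res : List String) (x : String) (qs : List String) :
    pvC res (x :: qs) = pvC (res ++ pvNews res (pvImp x)) (qs ++ pvNews res (pvImp x)) := by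
  have hdec := pvMu_step res x qs
  unfold pvC
  rw [← hdec]
  show pvBAux _ ((pvImp x).foldl pvStepB (res, qs)).1 ((pvImp x).foldl pvStepB (res, qs)).2 = _
  rw [pvFoldB]

theorem pvC_seg (p : List String) : ∀ res q,
    pvC res (p ++ q) = pvC (res ++ pvPass res p) (q ++ pvPass res p) := by
  induction p with
  | nil => intro res q; simp [pvPass]
  | cons x p ih =>
    intro res q
    rw [List.cons_append, pvC_step, List.append_assoc p q, ih]
    simp [pvPass, List.append_assoc]

theorem pvSat_pass (p : List String) : ∀ res, ∀ x ∈ p, ∀ z ∈ pvImp x, z ∈ res ++ pvPass res p := by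
  induction p with
  | nil => intro res x hx; simp at hx
  | cons x' p ih =>
    intro res x hx z hz
    simp only [pvPass]
    rcases List.mem_cons.1 hx with rfl | hx
    · have := pvNews_complete (pvImp x) res hz
      rcases List.mem_append.1 this with h1 | h1
      · exact List.mem_append.2 (Or.inl h1)
      · exact List.mem_append.2 (Or.inr (List.mem_append.2 (Or.inl h1)))
    · have := ih (res ++ pvNews res (pvImp x')) x hx z hz
      rw [List.append_assoc] at this
      exact this

theorem pvPass_nil_of_sat (p : List String) : ∀ res, (∀ x ∈ p, ∀ z ∈ pvImp x, z ∈ res) → pvPass res p = [] := by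
  induction p with
  | nil => intro res _; rfl
  | cons x p ih =>
    intro res h
    have hx : pvNews res (pvImp x) = [] := pvNews_nil_of_sub _ _ (h x List.mem_cons_self)
    simp only [pvPass, hx, List.nil_append, List.append_nil]
    exact ih res (fun y hy => h y (List.mem_cons_of_mem _ hy))

theorem pvNu_lt (cap : List String) (hne : pvPass cap cap ≠ []) :
    (impAllF \ (cap ++ pvPass cap cap).toFinset).card < (impAllF \ cap.toFinset).card := by
  apply Finset.card_lt_card
  constructor
  · intro z hz
    rcases Finset.mem_sdiff.1 hz with ⟨h1, h2⟩
    refine Finset.mem_sdiff.2 ⟨h1, fun hzc => h2 ?_⟩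
    simp only [List.mem_toFinset] at *
    exact List.mem_append.2 (Or.inl hzc)
  · intro hsub
    obtain ⟨z, hz⟩ := List.exists_mem_of_ne_nil _ hne
    rcases pvMem_pass _ _ hz with ⟨h1, h2⟩
    have hmem : z ∈ impAllF \ cap.toFinset := Finset.mem_sdiff.2 ⟨h1, by simpa [List.mem_toFinset] using h2⟩
    have := hsub hmem
    rcases Finset.mem_sdiff.1 this with ⟨_, h3⟩
    exact h3 (by simp [List.mem_toFinset]; right; exact hz)

theorem pvMain : ∀ f cap, (impAllF \ cap.toFinset).card < f → pvAAux f cap = pvC cap cap := by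
  intro f
  induction f with
  | zero => intro cap h; omega
  | succ f ih =>
    intro cap h
    show (let s := cap.foldl pvStepA (cap, 0); if s.2 > 0 then pvAAux f s.1 else s.1) = pvC cap cap
    rw [pvFoldPass]
    simp only [Nat.zero_add]
    by_cases hne : pvPass cap cap = []
    · have hsat : ∀ x ∈ cap, ∀ z ∈ pvImp x, z ∈ cap := by
        intro x hx z hz
        have := pvSat_pass cap cap x hx z hz
        simpa [hne] using this
      have h1 : pvC cap cap = cap := by
        have := pvC_seg cap cap []
        rw [List.append_nil] at this
        rw [this, hne]
        simp [pvC, pvBAux_nil]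
      simp [hne, h1]
    · have hlen : (pvPass cap cap).length > 0 := List.length_pos_iff.2 hne
      rw [if_pos hlen]
      have hdec := pvNu_lt cap hne
      rw [ih _ (by omega)]
      have hsat : ∀ x ∈ cap, ∀ z ∈ pvImp x, z ∈ cap ++ pvPass cap cap := pvSat_pass cap cap
      have hp0 : pvPass (cap ++ pvPass cap cap) cap = [] := pvPass_nil_of_sat cap _ hsat
      have hskip := pvC_seg cap (cap ++ pvPass cap cap) (pvPass cap cap)
      rw [hp0] at hskip
      simp only [List.append_nil] at hskip
      have hseg := pvC_seg cap cap []
      simp only [List.append_nil, List.nil_append] at hseg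
      rw [hskip, ← hseg]

theorem pvBAux_zero (res q : List String) : pvBAux 0 res q = res := by
  cases q <;> rfl

theorem pvBLoop_eq : ∀ (f : Nat) (res wl : List String) (i : Nat),
    pvBLoop f res wl i = pvBAux f res (wl.drop i) := by
  intro f
  induction f with
  | zero => intro res wl i; rw [pvBAux_zero]; rfl
  | succ f ih =>
    intro res wl i
    by_cases h : i < wl.length
    · have hd : wl.drop i = wl[i] :: wl.drop (i + 1) := List.drop_eq_getElem_cons h
      have hget : wl.getD i "" = wl[i] := by
        simp [List.getD_eq_getElem?_getD, List.getElem?_eq_getElem h]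
      show (if i < wl.length then _ else res) = _
      rw [if_pos h, hd]
      show pvBLoop f _ _ _ = pvBAux f _ _
      rw [hget, ih, pvFoldB]
      show pvBAux f _ _ = _
      rw [show PySem.Dict.getD impliedcapabilities wl[i] [] = pvImp wl[i] from rfl, pvFoldB]
      have hdrop : (wl ++ pvNews res (pvImp wl[i])).drop (i + 1)
          = wl.drop (i + 1) ++ pvNews res (pvImp wl[i]) :=
        List.drop_append_of_le_length (by omega)
      rw [hdrop]
    · have hd : wl.drop i = [] := List.drop_eq_nil_of_le (by omega)
      show (if i < wl.length then _ else res) = _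
      rw [if_neg h, hd, pvBAux_nil]

-- ===== VERDICT (by name: the statement is the Claim_ definition above) =====
theorem ProcessCapabs_spec : Claim_equal_ProcessCapabs := by
  intro capabin _
  show ProcessCapabs capabin = ProcessCapabs_alt capabin
  have hcard : (impAllF \ capabin.toFinset).card ≤ impAllF.card := Finset.card_le_card Finset.sdiff_subset
  unfold ProcessCapabs ProcessCapabs_alt
  rw [pvMain (impAllF.card + 1) capabin (by omega)]
  rw [pvBLoop_eq, List.drop_zero]
  rw [pvC_eq (capabin.length + impAllF.card) capabin capabin (by unfold pvMu; omega)]
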